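-- pv_equiv track=rewrite | github.com/muzzi85/clipmodeldeployedtoazure | room_classification.py | classify_room_from_objects_multi_label_count
-- ===== SOURCE A (Python) =====
-- def classify_room_from_objects_multi_label_count(objects_dict, min_score=3):
--     """
--     Infer room type from detected objects using object counts.
--
--     Args:
--         objects_dict (dict): {"object_label": count, ...}
--         min_score (int): minimum total score to confidently assign a room
--
--     Returns:
--         str: room type or "unknown"
--     """
--     # Normalize keys
--     detected = {k.lower().strip(): v for k, v in objects_dict.items()}
--     categories = {
--         "floorplan": ["a floorplan","a 2D house layout", "a real estate floor plan with dimensions", "a residential blueprint"],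
--         "bedroom": ["a bed", "a single bed", "a double bed", "a duvet", "a bedroom"],
--         "bathroom": ["a bath", "a bathroom basin", "a shower head", "a toilet seat", "a single ended bath", "a bathroom"],
--         "living/sitting room": ["a sofa", "a dinning table and chairs","a living room"],
--         "outdoor": ["a garden", "a tree", "a car", "a building", "a sea", "a seaview"],
--         "kitchen/cooking area": ["a refrigerator", "a kitchen stove", "a stove vent hood", "a kitchen", "a kitchen sink","a kitchen", "a cabinet and sink","a kitchen cabinet and sink","a sink tap","a cooking oven"],
--         "gym": ["a gym", "a training machine"],
--         "laundry": ["a washing machine"]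
--     }
--
--     # Compute scores per room
--     room_scores = {room: 0 for room in categories}
--     for room, objs in categories.items():
--         for obj in objs:
--             if obj in detected:
--                 room_scores[room] += detected[obj]  # count objects for weight
--
--     # Find the room with highest score
--     # best_room = max(room_scores, key=room_scores.get)
--     # best_score = room_scores[best_room]
--
--     if room_scores.get("floorplan", 0) >= 1:
--             return "floorplan"
--
--      # ---------------------------
--     # Rooms that pass threshold
--     # ---------------------------
--     valid_rooms = [
--         room for room, score in room_scores.items()
--         if score >= min_score and room != "floorplan"
--     ]
--     if not valid_rooms:
--             if room_scores.get("bedroom", 0) == 1: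
--                 return "bedroom"
--     else:
--         return "unknown"
--
--     if len(valid_rooms) == 1:
--         return valid_rooms[0]
--
--     # ---------------------------
--     # Mixed room case
--     # ---------------------------
--     return " & ".join(sorted(valid_rooms))
-- ===== SOURCE B (Python) =====
-- _CATEGORIES = {
--     "floorplan": ["a floorplan","a 2D house layout", "a real estate floor plan with dimensions", "a residential blueprint"],
--     "bedroom": ["a bed", "a single bed", "a double bed", "a duvet", "a bedroom"],
--     "bathroom": ["a bath", "a bathroom basin", "a shower head", "a toilet seat", "a single ended bath", "a bathroom"],
--     "living/sitting room": ["a sofa", "a dinning table and chairs","a living room"],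
--     "outdoor": ["a garden", "a tree", "a car", "a building", "a sea", "a seaview"],
--     "kitchen/cooking area": ["a refrigerator", "a kitchen stove", "a stove vent hood", "a kitchen", "a kitchen sink","a kitchen", "a cabinet and sink","a kitchen cabinet and sink","a sink tap","a cooking oven"],
--     "gym": ["a gym", "a training machine"],
--     "laundry": ["a washing machine"]
-- }
--
-- _ROOM_NAMES = list(_CATEGORIES)
--
-- # Inverted index: object label -> rooms it scores for, WITH multiplicity
-- # (e.g. "a kitchen" is listed twice for the kitchen, so it maps there twice).
-- _ROOMS_FOR = {}
-- for _room, _objs in _CATEGORIES.items():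
--     for _obj in _objs:
--         _ROOMS_FOR.setdefault(_obj, []).append(_room)
--
--
-- def classify_room_from_objects_multi_label_count(objects_dict, min_score=3):
--     detected = {k.lower().strip(): v for k, v in objects_dict.items()}
--     # One pass over the detections, scoring through the inverted index.
--     scores = {}
--     for label, count in detected.items():
--         for room in _ROOMS_FOR.get(label, []):
--             scores[room] = scores.get(room, 0) + count
--     if scores.get("floorplan", 0) >= 1:
--         return "floorplan"
--     if any(scores.get(room, 0) >= min_score
--            for room in _ROOM_NAMES if room != "floorplan"):
--         return "unknown"
--     if scores.get("bedroom", 0) == 1: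
--         return "bedroom"
--     return ""
-- ===== Notes on version B (the rewrite author's own statement) =====
-- stated objective: alternative
-- what changed: Replaces the nested scan over the category lists with an inverted label->rooms index (kept with multiplicity) consulted in a single pass over the detected objects, and replaces the dead-code decision tail (valid_rooms list, join of sorted) with the four reachable branches: floorplan, unknown, bedroom, ''.
import Mathlib
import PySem

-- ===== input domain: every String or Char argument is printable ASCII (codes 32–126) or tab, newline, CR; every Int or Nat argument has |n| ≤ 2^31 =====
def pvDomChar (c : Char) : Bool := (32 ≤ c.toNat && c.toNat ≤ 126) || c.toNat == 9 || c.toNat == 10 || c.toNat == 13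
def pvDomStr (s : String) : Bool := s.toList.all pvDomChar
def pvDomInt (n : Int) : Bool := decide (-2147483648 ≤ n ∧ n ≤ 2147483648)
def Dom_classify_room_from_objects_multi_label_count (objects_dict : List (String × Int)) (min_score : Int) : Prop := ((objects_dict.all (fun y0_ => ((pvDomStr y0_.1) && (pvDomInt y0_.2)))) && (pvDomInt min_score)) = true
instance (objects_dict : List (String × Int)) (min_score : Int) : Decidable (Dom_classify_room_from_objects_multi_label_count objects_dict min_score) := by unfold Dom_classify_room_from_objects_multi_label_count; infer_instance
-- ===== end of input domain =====

-- B replaces A's nested scan over the category lists by an inverted label→rooms index consulted in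
-- one pass over the detected objects, and the dead-code tail of A's decision by its four reachable
-- branches (objective: alternative; same cost at this fixed table size).

-- ===== PORT A =====

-- the `categories` literal of the Python source (both Pythons carry this same literal)
def pvCategories : List (String × List String) :=
  [ ("floorplan", ["a floorplan", "a 2D house layout", "a real estate floor plan with dimensions", "a residential blueprint"]),
    ("bedroom", ["a bed", "a single bed", "a double bed", "a duvet", "a bedroom"]),
    ("bathroom", ["a bath", "a bathroom basin", "a shower head", "a toilet seat", "a single ended bath", "a bathroom"]),
    ("living/sitting room", ["a sofa", "a dinning table and chairs", "a living room"]),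
    ("outdoor", ["a garden", "a tree", "a car", "a building", "a sea", "a seaview"]),
    ("kitchen/cooking area", ["a refrigerator", "a kitchen stove", "a stove vent hood", "a kitchen", "a kitchen sink", "a kitchen", "a cabinet and sink", "a kitchen cabinet and sink", "a sink tap", "a cooking oven"]),
    ("gym", ["a gym", "a training machine"]),
    ("laundry", ["a washing machine"]) ]

-- `{k.lower().strip(): v for k, v in objects_dict.items()}` (the same line occurs in A and B)
def pvDetected (objects_dict : List (String × Int)) : PySem.Dict String Int :=
  objects_dict.foldl (fun d kv => d.insert (PySem.Str.strip (PySem.Str.lower kv.1)) kv.2) PySem.Dict.empty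

def classify_room_from_objects_multi_label_count (objects_dict : List (String × Int)) (min_score : Int) : String :=
  let detected := pvDetected objects_dict
  -- room_scores = {room: 0 for room in categories}
  let room_scores0 : PySem.Dict String Int :=
    pvCategories.foldl (fun rs p => rs.insert p.1 0) PySem.Dict.empty
  -- for room, objs in categories.items(): for obj in objs: if obj in detected: room_scores[room] += detected[obj]
  let room_scores :=
    pvCategories.foldl (fun rs p =>
      p.2.foldl (fun rs obj =>
        if detected.contains obj then
          rs.insert p.1 (rs.getD p.1 0 + detected.getD obj 0)
        else rs) rs) room_scores0
  if room_scores.getD "floorplan" 0 ≥ 1 then "floorplan"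
  else
    let valid_rooms :=
      room_scores.items.foldl (fun acc p =>
        if p.2 ≥ min_score ∧ p.1 ≠ "floorplan" then acc ++ [p.1] else acc) []
    if valid_rooms = [] then
      if room_scores.getD "bedroom" 0 = 1 then "bedroom"
      else if PySem.List.len valid_rooms = 1 then PySem.List.pyGetD valid_rooms 0 ""
      else PySem.Str.join " & " (PySem.List.sorted valid_rooms (fun x => x) false)
    else "unknown"

-- ===== PORT B =====

-- _ROOM_NAMES = list(_CATEGORIES)
def pvRoomNames : List String := pvCategories.map (fun p => p.1)

-- for _room, _objs in _CATEGORIES.items(): for _obj in _objs: _ROOMS_FOR.setdefault(_obj, []).append(_room)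
def pvRoomsFor : PySem.Dict String (List String) :=
  pvCategories.foldl (fun d p =>
    p.2.foldl (fun d obj => d.modify obj [] (fun rs => rs ++ [p.1])) d)
    PySem.Dict.empty

def classify_room_from_objects_multi_label_count_alt (objects_dict : List (String × Int)) (min_score : Int) : String :=
  let detected := pvDetected objects_dict
  -- for label, count in detected.items(): for room in _ROOMS_FOR.get(label, []): scores[room] = scores.get(room, 0) + count
  let scores : PySem.Dict String Int :=
    detected.items.foldl (fun sc p =>
      (pvRoomsFor.getD p.1 []).foldl (fun sc room =>
        sc.insert room (sc.getD room 0 + p.2)) sc) PySem.Dict.empty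
  if scores.getD "floorplan" 0 ≥ 1 then "floorplan"
  else if pvRoomNames.any (fun room => !(room == "floorplan") && decide (scores.getD room 0 ≥ min_score)) then "unknown"
  else if scores.getD "bedroom" 0 = 1 then "bedroom"
  else ""

-- ===== PRECONDITION & SPEC =====
def Spec_classify_room_from_objects_multi_label_count (objects_dict : List (String × Int)) (min_score : Int) (out : String) : Prop := out = classify_room_from_objects_multi_label_count_alt objects_dict min_score
instance (objects_dict : List (String × Int)) (min_score : Int) (out : String) : Decidable (Spec_classify_room_from_objects_multi_label_count objects_dict min_score out) := by unfold Spec_classify_room_from_objects_multi_label_count; infer_instance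

-- ===== CLAIM (what is proved, stated in full; the proofs are below) =====
def Claim_equal_classify_room_from_objects_multi_label_count : Prop := ∀ (objects_dict : List (String × Int)) (min_score : Int), Dom_classify_room_from_objects_multi_label_count objects_dict min_score → Spec_classify_room_from_objects_multi_label_count objects_dict min_score (classify_room_from_objects_multi_label_count objects_dict min_score)

-- ===== LEMMAS AND PROOFS =====

-- proof-side names for the two score dictionaries
def pvScoresA (d : PySem.Dict String Int) : PySem.Dict String Int :=
  pvCategories.foldl (fun rs p =>
    p.2.foldl (fun rs obj =>
      if d.contains obj then
        rs.insert p.1 (rs.getD p.1 0 + d.getD obj 0)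
      else rs) rs)
    (pvCategories.foldl (fun rs p => rs.insert p.1 0) PySem.Dict.empty)

def pvScoresB (d : PySem.Dict String Int) : PySem.Dict String Int :=
  d.items.foldl (fun sc p =>
    (pvRoomsFor.getD p.1 []).foldl (fun sc room =>
      sc.insert room (sc.getD room 0 + p.2)) sc) PySem.Dict.empty

-- keys of `detected` are unique
lemma pv_detected_nodup (objects_dict : List (String × Int)) : (pvDetected objects_dict).keys.Nodup := by
  exact PySem.Dict.nodup_keys_foldl_insert_key objects_dict
    (fun kv => PySem.Str.strip (PySem.Str.lower kv.1)) (fun _ kv => kv.2) PySem.Dict.empty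
    (by simp [PySem.Dict.keys, PySem.Dict.empty])

-- A's inner loop, score read-out
lemma pv_innerA (d : PySem.Dict String Int) (room r : String) (objs : List String)
    (rs : PySem.Dict String Int) :
    (objs.foldl (fun rs obj =>
        if d.contains obj then rs.insert room (rs.getD room 0 + d.getD obj 0) else rs) rs).getD r 0
    = rs.getD r 0 + (if r = room then (objs.map (fun o => d.getD o 0)).sum else 0) := by
  induction objs generalizing rs with
  | nil => simp
  | cons o t ih =>
    simp only [List.foldl_cons, List.map_cons, List.sum_cons]
    rw [ih]
    by_cases hc : d.contains o = true
    · rw [if_pos hc, PySem.Dict.getD_insert]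
      by_cases h : r = room
      · simp [h]; ring
      · simp [h]
    · have h0 : d.getD o 0 = 0 := PySem.Dict.getD_of_not_contains d 0 (by simpa using hc)
      rw [if_neg hc]
      by_cases h : r = room
      · simp [h, h0]
      · simp [h]

-- A's inner loop preserves the key set when `room` is already a key
lemma pv_innerA_keys (d : PySem.Dict String Int) (room : String) (objs : List String)
    (rs : PySem.Dict String Int) (h : room ∈ rs.keys) :
    (objs.foldl (fun rs obj =>
        if d.contains obj then rs.insert room (rs.getD room 0 + d.getD obj 0) else rs) rs).keys
    = rs.keys := by
  induction objs generalizing rs with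
  | nil => rfl
  | cons o t ih =>
    simp only [List.foldl_cons]
    by_cases hc : d.contains o = true
    · rw [if_pos hc]
      rw [ih _ (by rw [PySem.Dict.keys_insert_of_contains rs _ ((PySem.Dict.contains_iff_mem_keys rs room).2 h)]; exact h)]
      exact PySem.Dict.keys_insert_of_contains rs _ ((PySem.Dict.contains_iff_mem_keys rs room).2 h)
    · rw [if_neg hc]; exact ih rs h

-- A's outer loop, score read-out
lemma pv_outerA (d : PySem.Dict String Int) (cats : List (String × List String)) (r : String)
    (rs : PySem.Dict String Int) :
    (cats.foldl (fun rs p =>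
        p.2.foldl (fun rs obj =>
          if d.contains obj then rs.insert p.1 (rs.getD p.1 0 + d.getD obj 0) else rs) rs) rs).getD r 0
    = rs.getD r 0 + (cats.map (fun p => if r = p.1 then (p.2.map (fun o => d.getD o 0)).sum else 0)).sum := by
  induction cats generalizing rs with
  | nil => simp
  | cons c t ih =>
    simp only [List.foldl_cons, List.map_cons, List.sum_cons]
    rw [ih, pv_innerA]
    ring

-- A's outer loop preserves the key set
lemma pv_outerA_keys (d : PySem.Dict String Int) (cats : List (String × List String))
    (rs : PySem.Dict String Int) (h : ∀ p ∈ cats, p.1 ∈ rs.keys) :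
    (cats.foldl (fun rs p =>
        p.2.foldl (fun rs obj =>
          if d.contains obj then rs.insert p.1 (rs.getD p.1 0 + d.getD obj 0) else rs) rs) rs).keys
    = rs.keys := by
  induction cats generalizing rs with
  | nil => rfl
  | cons c t ih =>
    simp only [List.foldl_cons]
    have hk := pv_innerA_keys d c.1 c.2 rs (h c (by simp))
    rw [ih _ (by intro p hp; rw [hk]; exact h p (by simp [hp])), hk]

-- B's inner loop, score read-out
lemma pv_innerB (v : Int) (rooms : List String) (r : String) (sc : PySem.Dict String Int) :
    (rooms.foldl (fun sc room => sc.insert room (sc.getD room 0 + v)) sc).getD r 0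
    = sc.getD r 0 + v * (rooms.count r : Int) := by
  induction rooms generalizing sc with
  | nil => simp
  | cons room t ih =>
    simp only [List.foldl_cons]
    rw [ih, PySem.Dict.getD_insert, List.count_cons]
    by_cases h : r = room
    · simp [h]; ring
    · have : (room == r) = false := by simpa [beq_iff_eq] using (Ne.symm h)
      simp [h, this]

-- B's outer loop, score read-out (generic over the items list and the index)
lemma pv_outerB (g : String → List String) (l : List (String × Int)) (r : String)
    (sc : PySem.Dict String Int) :
    (l.foldl (fun sc p =>
        (g p.1).foldl (fun sc room => sc.insert room (sc.getD room 0 + p.2)) sc) sc).getD r 0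
    = sc.getD r 0 + (l.map (fun p => p.2 * ((g p.1).count r : Int))).sum := by
  induction l generalizing sc with
  | nil => simp
  | cons p t ih =>
    simp only [List.foldl_cons, List.map_cons, List.sum_cons]
    rw [ih, pv_innerB]
    ring

-- the nested index-building loop as one flat loop over (label, room) pairs
lemma pv_flat_fold (cats : List (String × List String)) (e : PySem.Dict String (List String)) :
    cats.foldl (fun d p =>
        p.2.foldl (fun d obj => d.modify obj [] (fun rs => rs ++ [p.1])) d) e
    = (cats.flatMap (fun p => p.2.map (fun o => (o, p.1)))).foldl
        (fun d q => d.modify q.1 [] (fun rs => rs ++ [q.2])) e := by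
  induction cats generalizing e with
  | nil => rfl
  | cons c t ih =>
    simp only [List.foldl_cons, List.flatMap_cons, List.foldl_append, List.foldl_map]
    exact ih _

-- what the inverted index stores for an arbitrary label
lemma pv_roomsFor_getD (k : String) :
    pvRoomsFor.getD k []
    = ((pvCategories.flatMap (fun p => p.2.map (fun o => (o, p.1)))).filter
        (fun q => q.1 == k)).map (fun q => q.2) := by
  unfold pvRoomsFor
  rw [pv_flat_fold]
  rw [PySem.Dict.getD_foldl_modify_append]
  rfl

-- multiplicity stored in the index = multiplicity of the label in the room's list
lemma pv_count_index (r : String) (hr : r ∈ pvRoomNames) (k : String) :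
    (pvRoomsFor.getD k []).count r
    = ((pvCategories.filter (fun p => p.1 == r)).flatMap (fun p => p.2)).count k := by
  rw [pv_roomsFor_getD]
  have hcm : ∀ (l : List (String × String)), (l.map (fun q => q.2)).count r = l.countP (fun q => q.2 == r) := by
    intro l
    induction l with
    | nil => rfl
    | cons a t ih => simp [List.count_cons, List.countP_cons, ih]
  rw [hcm, List.countP_filter]
  simp only [pvRoomNames, pvCategories, List.map_cons, List.map_nil] at hr
  fin_cases hr <;>
    simp [pvCategories, List.count_cons, List.countP_cons]

-- getD as a sum over the items of a dict with unique keys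
lemma pv_getD_eq_sum (l : List (String × Int)) (hnd : (l.map Prod.fst).Nodup) (o : String) :
    (PySem.Dict.mk l).getD o 0 = (l.map (fun p => if o = p.1 then p.2 else 0)).sum := by
  induction l with
  | nil => rfl
  | cons p t ih =>
    simp only [List.map_cons, List.sum_cons, List.nodup_cons] at hnd ⊢
    by_cases h : o = p.1
    · have hz : ∀ q ∈ t, (if o = (q : String × Int).1 then q.2 else 0) = 0 := by
        intro q hq
        have hne : o ≠ q.1 := by
          intro he
          have hpq : p.1 = q.1 := by rw [← h, he]
          exact hnd.1 (by rw [hpq]; exact List.mem_map.2 ⟨q, hq, rfl⟩)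
        simp [hne]
      have hz2 : (t.map (fun q => if o = q.1 then q.2 else 0)).sum = 0 :=
        List.sum_eq_zero (by intro x hx; obtain ⟨q, hq, rfl⟩ := List.mem_map.1 hx; exact hz q hq)
      have hb : (p.1 == o) = true := by simp [h.symm]
      rw [PySem.Dict.getD_eq_get?_getD, PySem.Dict.get?_mk_cons, hb]
      rw [hz2]
      simp [h]
    · have hb : (p.1 == o) = false := by simpa [beq_iff_eq] using (Ne.symm h)
      rw [PySem.Dict.getD_eq_get?_getD, PySem.Dict.get?_mk_cons, hb]
      simp only [Bool.false_eq_true, if_false, if_neg h, zero_add]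
      rw [← PySem.Dict.getD_eq_get?_getD]
      exact ih hnd.2

-- the exchange of summation: a sum of lookups over labels = a sum over the dict's items
lemma pv_exchange (d : PySem.Dict String Int) (hnd : d.keys.Nodup) (objs : List String) :
    (objs.map (fun o => d.getD o 0)).sum
    = (d.items.map (fun p => p.2 * (objs.count p.1 : Int))).sum := by
  induction objs with
  | nil => simp
  | cons o t ih =>
    simp only [List.map_cons, List.sum_cons]
    rw [ih]
    have hx : ∀ p : String × Int, p.2 * ((o :: t).count p.1 : Int)
        = (if o = p.1 then p.2 else 0) + p.2 * (t.count p.1 : Int) := by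
      intro p
      rw [List.count_cons]
      by_cases h : o = p.1
      · simp [h]; ring
      · have : (o == p.1) = false := by simpa [beq_iff_eq] using h
        simp [h, this]
    calc d.getD o 0 + (d.items.map (fun p => p.2 * (t.count p.1 : Int))).sum
        = (d.items.map (fun p => if o = p.1 then p.2 else 0)).sum
          + (d.items.map (fun p => p.2 * (t.count p.1 : Int))).sum := by
          rw [← pv_getD_eq_sum d.items (by simpa [PySem.Dict.keys] using hnd) o]
      _ = (d.items.map (fun p => p.2 * ((o :: t).count p.1 : Int))).sum := by
          rw [← List.sum_map_add]
          apply congrArg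
          apply List.map_congr_left
          intro p _
          rw [hx p]

-- collapsing A's if-guarded sum over all categories to the matching room's list
lemma pv_sum_ite_filter (d : PySem.Dict String Int) (cats : List (String × List String)) (r : String)
    (hnd : (cats.map Prod.fst).Nodup) :
    (cats.map (fun p => if r = p.1 then (p.2.map (fun o => d.getD o 0)).sum else 0)).sum
    = (((cats.filter (fun p => p.1 == r)).flatMap (fun p => p.2)).map (fun o => d.getD o 0)).sum := by
  induction cats with
  | nil => simp
  | cons c t ih =>
    simp only [List.map_cons, List.sum_cons, List.nodup_cons] at hnd ⊢
    by_cases h : r = c.1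
    · have hb : (c.1 == r) = true := by simp [h.symm]
      have hfil : t.filter (fun p => p.1 == r) = [] := by
        rw [List.filter_eq_nil_iff]
        intro p hp
        simp only [beq_iff_eq]
        intro he
        have hcp : c.1 = p.1 := by rw [← h, he]
        exact hnd.1 (by rw [hcp]; exact List.mem_map.2 ⟨p, hp, rfl⟩)
      have hz : (t.map (fun p => if r = p.1 then (p.2.map (fun o => d.getD o 0)).sum else 0)).sum = 0 := by
        apply List.sum_eq_zero
        intro x hx
        obtain ⟨q, hq, rfl⟩ := List.mem_map.1 hx
        have hne : r ≠ q.1 := by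
          intro he
          have hcq : c.1 = q.1 := by rw [← h, he]
          exact hnd.1 (by rw [hcq]; exact List.mem_map.2 ⟨q, hq, rfl⟩)
        simp [hne]
      rw [List.filter_cons, if_pos hb, List.flatMap_cons, hfil]
      simp only [List.flatMap_nil, List.append_nil, if_pos h, hz, add_zero]
    · have hb : (c.1 == r) = false := by simpa [beq_iff_eq] using (Ne.symm h)
      rw [List.filter_cons, if_neg h, zero_add, if_neg (by simp [hb])]
      exact ih hnd.2

-- initial room_scores dictionary reads 0 everywhere
lemma pv_init_zero (r : String) :
    ((pvCategories.foldl (fun rs p => rs.insert p.1 0) PySem.Dict.empty) : PySem.Dict String Int).getD r 0 = 0 := by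
  simp only [pvCategories, List.foldl_cons, List.foldl_nil, PySem.Dict.getD_insert]
  split_ifs <;> rfl

-- the two score dictionaries agree on every room name
lemma pv_scores_agree (objects_dict : List (String × Int)) (r : String) (hr : r ∈ pvRoomNames) :
    (pvScoresA (pvDetected objects_dict)).getD r 0 = (pvScoresB (pvDetected objects_dict)).getD r 0 := by
  have hnd := pv_detected_nodup objects_dict
  unfold pvScoresA pvScoresB
  rw [pv_outerA, pv_init_zero, zero_add,
      pv_sum_ite_filter _ _ _ (by decide),
      pv_exchange _ hnd,
      pv_outerB (fun k => pvRoomsFor.getD k []), PySem.Dict.getD_empty, zero_add]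
  apply congrArg
  apply List.map_congr_left
  intro p _
  rw [pv_count_index r hr p.1]

-- A's decision code over a given score dictionary
def pvDecA (sc : PySem.Dict String Int) (m : Int) : String :=
  if sc.getD "floorplan" 0 ≥ 1 then "floorplan"
  else
    let valid_rooms :=
      sc.items.foldl (fun acc p =>
        if p.2 ≥ m ∧ p.1 ≠ "floorplan" then acc ++ [p.1] else acc) []
    if valid_rooms = [] then
      if sc.getD "bedroom" 0 = 1 then "bedroom"
      else if PySem.List.len valid_rooms = 1 then PySem.List.pyGetD valid_rooms 0 ""
      else PySem.Str.join " & " (PySem.List.sorted valid_rooms (fun x => x) false)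
    else "unknown"

-- B's decision code over a given score dictionary
def pvDecB (sc : PySem.Dict String Int) (m : Int) : String :=
  if sc.getD "floorplan" 0 ≥ 1 then "floorplan"
  else if pvRoomNames.any (fun room => !(room == "floorplan") && decide (sc.getD room 0 ≥ m)) then "unknown"
  else if sc.getD "bedroom" 0 = 1 then "bedroom"
  else ""

lemma pv_A_eq (objects_dict : List (String × Int)) (min_score : Int) :
    classify_room_from_objects_multi_label_count objects_dict min_score
    = pvDecA (pvScoresA (pvDetected objects_dict)) min_score := rfl

lemma pv_B_eq (objects_dict : List (String × Int)) (min_score : Int) :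
    classify_room_from_objects_multi_label_count_alt objects_dict min_score
    = pvDecB (pvScoresB (pvDetected objects_dict)) min_score := rfl

-- key set of A's score dictionary
lemma pv_keysA (objects_dict : List (String × Int)) :
    (pvScoresA (pvDetected objects_dict)).keys = pvRoomNames := by
  unfold pvScoresA
  rw [pv_outerA_keys _ _ _ (by decide)]
  decide

-- the two decision codes agree when the scores agree on the room names
lemma pv_dec_eq (gA gB : PySem.Dict String Int) (m : Int)
    (hkeys : gA.keys = pvRoomNames)
    (hag : ∀ r ∈ pvRoomNames, gA.getD r 0 = gB.getD r 0) :
    pvDecA gA m = pvDecB gB m := by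
  have hfp : gA.getD "floorplan" 0 = gB.getD "floorplan" 0 := hag _ (by decide)
  have hbed : gA.getD "bedroom" 0 = gB.getD "bedroom" 0 := hag _ (by decide)
  have hnd : gA.keys.Nodup := by rw [hkeys]; decide
  have hitems : gA.items = pvRoomNames.map (fun k => (k, gA.getD k 0)) := by
    rw [PySem.Dict.items_eq_map_keys gA hnd 0, hkeys]
  unfold pvDecA pvDecB
  rw [hitems,
      PySem.List.foldl_append_ite (p := fun p : String × Int => p.2 ≥ m ∧ p.1 ≠ "floorplan")
        (f := fun p : String × Int => p.1),
      List.filter_map, List.map_map]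
  simp only [List.nil_append, Function.comp_def, List.map_id_fun', id_eq]
  by_cases h1 : gA.getD "floorplan" 0 ≥ 1
  · have h1b : gB.getD "floorplan" 0 ≥ 1 := by rw [← hfp]; exact h1
    rw [if_pos h1, if_pos h1b]
  · have h1b : ¬ gB.getD "floorplan" 0 ≥ 1 := by rw [← hfp]; exact h1
    rw [if_neg h1, if_neg h1b]
    by_cases h2 : pvRoomNames.filter
        (fun k => decide ((gA.getD k 0 ≥ m ∧ k ≠ "floorplan"))) = []
    · have hany : pvRoomNames.any
          (fun room => !(room == "floorplan") && decide (gB.getD room 0 ≥ m)) = false := by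
        rw [List.any_eq_false]
        intro k hk
        rw [List.filter_eq_nil_iff] at h2
        have h2k := h2 k hk
        simp only [decide_eq_true_eq, not_and] at h2k
        simp only [Bool.and_eq_true, Bool.not_eq_true', beq_eq_false_iff_ne, decide_eq_true_eq,
          not_and]
        intro hne hge
        have hgea : gA.getD k 0 ≥ m := by rw [hag k hk]; exact hge
        exact (h2k hgea) hne
      rw [if_pos h2, hany]
      simp only [Bool.false_eq_true, if_false]
      rw [h2, hbed]
      by_cases h3 : gB.getD "bedroom" 0 = 1
      · rw [if_pos h3, if_pos h3]
      · rw [if_neg h3, if_neg h3, if_neg (by decide)]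
        rfl
    · have hany : pvRoomNames.any
          (fun room => !(room == "floorplan") && decide (gB.getD room 0 ≥ m)) = true := by
        rw [List.any_eq_true]
        obtain ⟨k, hkf⟩ := List.exists_mem_of_ne_nil _ h2
        have hk := (List.mem_filter.1 hkf).1
        have hpk := (List.mem_filter.1 hkf).2
        simp only [decide_eq_true_eq] at hpk
        refine ⟨k, hk, ?_⟩
        simp only [Bool.and_eq_true, Bool.not_eq_true', beq_eq_false_iff_ne, decide_eq_true_eq]
        exact ⟨hpk.2, by rw [← hag k hk]; exact hpk.1⟩
      rw [if_neg h2, hany, if_pos rfl]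

-- ===== VERDICT (by name: the statement is the Claim_ definition above) =====
theorem classify_room_from_objects_multi_label_count_spec : Claim_equal_classify_room_from_objects_multi_label_count := by
  intro objects_dict min_score _
  unfold Spec_classify_room_from_objects_multi_label_count
  rw [pv_A_eq, pv_B_eq]
  exact pv_dec_eq _ _ _ (pv_keysA objects_dict) (fun r hr => pv_scores_agree objects_dict r hr)
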